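-- pv_equiv track=rewrite | github.com/paiml/depyler | examples/hard_lang_cfg_parse.py | follow_set
-- ===== SOURCE A (Python) =====
-- from typing import List, Tuple
--
-- def follow_set(rules: List[List[int]], symbol: int) -> List[int]:
--     result: List[int] = []
--     for rule in rules:
--         for i in range(1, len(rule)):
--             if rule[i] == symbol and i + 1 < len(rule):
--                 nxt: int = rule[i + 1]
--                 found: bool = False
--                 for r in result:
--                     if r == nxt:
--                         found = True
--                 if not found:
--                     result.append(nxt)
--     return result
-- ===== SOURCE B (Python) =====
-- def _uniq(xs):
--     # first-occurrence dedup by repeated filtering: keep the head,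
--     # strip every later copy of it from the rest, recurse on the remainder
--     if not xs:
--         return []
--     return [xs[0]] + _uniq([x for x in xs[1:] if x != xs[0]])
--
--
-- def follow_set(rules, symbol):
--     # phase 1: collect every symbol that follows `symbol`, by sliding a
--     # zip of each rule's tail against its own tail (no index arithmetic)
--     cands = [b for rule in rules for a, b in zip(rule[1:], rule[2:]) if a == symbol]
--     # phase 2: order-preserving dedup by recursive filtering
--     return _uniq(cands)
-- ===== Notes on version B (the rewrite author's own statement) =====
-- stated objective: alternative
-- what changed: Replaces A's index loop with inner membership scan over the growing result by two phases: collect candidates via zip(rule[1:], rule[2:]) adjacent-pair sliding (no indices), then dedup by a quickselect-style recursion that keeps the head and filters all its later copies out of the remainder.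
import Mathlib
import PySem

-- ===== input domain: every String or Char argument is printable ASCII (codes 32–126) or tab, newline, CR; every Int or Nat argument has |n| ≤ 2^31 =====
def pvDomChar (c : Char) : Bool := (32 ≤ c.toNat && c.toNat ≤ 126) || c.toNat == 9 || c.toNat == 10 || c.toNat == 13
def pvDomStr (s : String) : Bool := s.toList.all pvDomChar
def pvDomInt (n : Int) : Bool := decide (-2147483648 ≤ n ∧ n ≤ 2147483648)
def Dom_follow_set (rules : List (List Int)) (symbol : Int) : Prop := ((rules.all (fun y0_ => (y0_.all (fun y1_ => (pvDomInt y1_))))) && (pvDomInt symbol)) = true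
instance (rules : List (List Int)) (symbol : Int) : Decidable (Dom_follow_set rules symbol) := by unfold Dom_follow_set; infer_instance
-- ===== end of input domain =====

-- B replaces A's index loop + inner membership scan by two phases: candidate
-- collection via a zip of each rule's two tails, then a recursive filtering dedup.

-- ===== PORT A =====
def follow_set (rules : List (List Int)) (symbol : Int) : List Int :=
  rules.foldl (fun result rule =>
    (PySem.List.pyRange 1 rule.length 1).foldl (fun result i =>
      if (PySem.List.pyGetD rule i 0 == symbol) && decide (i + 1 < (rule.length : Int)) then
        let nxt : Int := PySem.List.pyGetD rule (i + 1) 0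
        let found : Bool := result.foldl (fun found r => if r == nxt then true else found) false
        if !found then result ++ [nxt] else result
      else result) result) []

-- ===== PORT B =====
-- _uniq: keep the head, strip its later copies from the rest, recurse.
def uniqB : List Int → List Int
  | [] => []
  | x :: xs => x :: uniqB (xs.filter (fun y => y != x))
termination_by xs => xs.length
decreasing_by
  simp only [List.length_unattach, List.length_cons]
  exact Nat.lt_succ_of_le (le_trans (List.length_filter_le _ _) (by simp))

def follow_set_alt (rules : List (List Int)) (symbol : Int) : List Int :=
  uniqB (rules.flatMap (fun rule =>
    (((PySem.List.slice rule (some 1) none).zip (PySem.List.slice rule (some 2) none)).filter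
        (fun p => p.1 == symbol)).map Prod.snd))

-- ===== PRECONDITION & SPEC =====
def Spec_follow_set (rules : List (List Int)) (symbol : Int) (out : List Int) : Prop := out = follow_set_alt rules symbol
instance (rules : List (List Int)) (symbol : Int) (out : List Int) : Decidable (Spec_follow_set rules symbol out) := by unfold Spec_follow_set; infer_instance

-- ===== CLAIM (what is proved, stated in full; the proofs are below) =====
def Claim_equal_follow_set : Prop := ∀ (rules : List (List Int)) (symbol : Int), Dom_follow_set rules symbol → Spec_follow_set rules symbol (follow_set rules symbol)

-- ===== LEMMAS AND PROOFS =====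

-- A's candidate list for one rule, in index form.
def candA (rule : List Int) (symbol : Int) : List Int :=
  ((PySem.List.pyRange 1 ((rule.length : Int) - 1) 1).filter
      (fun i => PySem.List.pyGetD rule i 0 == symbol)).map
    (fun i => PySem.List.pyGetD rule (i + 1) 0)

-- B's candidate list for one rule, in zip form.
def candB (rule : List Int) (symbol : Int) : List Int :=
  (((PySem.List.slice rule (some 1) none).zip (PySem.List.slice rule (some 2) none)).filter
      (fun p => p.1 == symbol)).map Prod.snd

-- A's inner membership scan computes List.contains.
theorem found_eq_contains (res : List Int) (x : Int) :
    res.foldl (fun found r => if r == x then true else found) false = res.contains x := by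
  have h : ∀ (b : Bool), res.foldl (fun found r => if r == x then true else found) b
      = (b || res.contains x) := by
    induction res with
    | nil => simp
    | cons y ys ih =>
      intro b
      simp only [List.foldl_cons, List.contains_cons]
      rw [ih]
      by_cases hy : y == x
      · have hxy : x = y := (eq_of_beq hy).symm
        simp [hxy]

      · have hxy : (x == y) = false := by rw [BEq.comm]; simpa using hy
        simp [hy, hxy]
  simpa using h false

-- A's conditional-append step is PySem.Set.add.
theorem step_eq_add (res : List Int) (x : Int) :
    (let found : Bool := res.foldl (fun found r => if r == x then true else found) false
     if !found then res ++ [x] else res) = PySem.Set.add res x := by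
  simp only [found_eq_contains, PySem.Set.add]
  by_cases h : res.contains x <;> simp_all

-- fold of "add f i when p i" over an index list = fold of add over the filtered-mapped list.
theorem foldl_cond_add (l : List Int) (p : Int → Bool) (f : Int → Int) (acc : List Int) :
    l.foldl (fun res i => if p i then PySem.Set.add res (f i) else res) acc
      = ((l.filter p).map f).foldl PySem.Set.add acc := by
  induction l generalizing acc with
  | nil => rfl
  | cons i is ih =>
    by_cases h : p i <;> simp [h, ih]

-- A's guard-filtered index list equals the shorter range filtered by the symbol test alone.
theorem range_filter_eq (rule : List Int) (symbol : Int) :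
    (PySem.List.pyRange 1 rule.length 1).filter
        (fun i => (PySem.List.pyGetD rule i 0 == symbol) && decide (i + 1 < (rule.length : Int)))
      = (PySem.List.pyRange 1 ((rule.length : Int) - 1) 1).filter
          (fun i => PySem.List.pyGetD rule i 0 == symbol) := by
  by_cases hlen : (rule.length : Int) ≤ 1
  · rw [PySem.List.pyRange_one_eq_nil hlen, PySem.List.pyRange_one_eq_nil (by omega)]
    rfl
  · have h2 : (1 : Int) ≤ (rule.length : Int) - 1 := by omega
    have hsplit : PySem.List.pyRange 1 (rule.length : Int) 1
        = PySem.List.pyRange 1 ((rule.length : Int) - 1) 1 ++ [(rule.length : Int) - 1] := by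
      have := PySem.List.pyRange_one_succ_right (a := 1) (b := (rule.length : Int) - 1) h2
      simpa [sub_add_cancel] using this
    rw [hsplit, List.filter_append]
    have hlast : ([(rule.length : Int) - 1].filter
        (fun i => (PySem.List.pyGetD rule i 0 == symbol) && decide (i + 1 < (rule.length : Int)))) = [] := by
      simp [List.filter]
    rw [hlast, List.append_nil]
    apply List.filter_congr
    intro i hi
    have hmem := (PySem.List.mem_pyRange_one).1 hi
    have : decide (i + 1 < (rule.length : Int)) = true := by
      simp; omega
    simp [this]

-- fold of A's inner loop over one rule = fold of Set.add over candA of that rule.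
theorem inner_eq (rule : List Int) (symbol : Int) (acc : List Int) :
    (PySem.List.pyRange 1 rule.length 1).foldl (fun result i =>
      if (PySem.List.pyGetD rule i 0 == symbol) && decide (i + 1 < (rule.length : Int)) then
        let nxt : Int := PySem.List.pyGetD rule (i + 1) 0
        let found : Bool := result.foldl (fun found r => if r == nxt then true else found) false
        if !found then result ++ [nxt] else result
      else result) acc
    = (candA rule symbol).foldl PySem.Set.add acc := by
  have hstep : (fun (result : List Int) (i : Int) =>
      if (PySem.List.pyGetD rule i 0 == symbol) && decide (i + 1 < (rule.length : Int)) then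
        let nxt : Int := PySem.List.pyGetD rule (i + 1) 0
        let found : Bool := result.foldl (fun found r => if r == nxt then true else found) false
        if !found then result ++ [nxt] else result
      else result)
    = (fun (result : List Int) (i : Int) =>
      if ((PySem.List.pyGetD rule i 0 == symbol) && decide (i + 1 < (rule.length : Int))) then
        PySem.Set.add result (PySem.List.pyGetD rule (i + 1) 0) else result) := by
    funext result i
    by_cases h : (PySem.List.pyGetD rule i 0 == symbol) && decide (i + 1 < (rule.length : Int))
    · simp only [h, if_true]
      exact step_eq_add result _
    · simp only [h, if_false, Bool.false_eq_true]
  rw [hstep, foldl_cond_add, range_filter_eq]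
  rfl

-- the index-range pair list equals the zip of the two tails.
theorem zip_eq_range_pairs (rule : List Int) :
    (rule.drop 1).zip (rule.drop 2)
      = (List.range (rule.length - 2)).map
          (fun (k : Nat) => ((PySem.List.pyGetD rule ((1 + k : Nat) : Int) 0 : Int),
            PySem.List.pyGetD rule ((2 + k : Nat) : Int) 0)) := by
  apply List.ext_getElem
  · simp [List.length_zip]
    omega
  · intro k h1 h2
    have hk : k < rule.length - 2 := by
      simp [List.length_zip] at h1
      omega
    have hk1 : 1 + k < rule.length := by omega
    have hk2 : 2 + k < rule.length := by omega
    have g1 : PySem.List.pyGetD rule ((1 + k : Nat) : Int) 0 = rule[1 + k] := by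
      rw [PySem.List.pyGetD_natCast]
      exact List.getD_eq_getElem rule 0 hk1
    have g2 : PySem.List.pyGetD rule ((2 + k : Nat) : Int) 0 = rule[2 + k] := by
      rw [PySem.List.pyGetD_natCast]
      exact List.getD_eq_getElem rule 0 hk2
    rw [List.getElem_zip, List.getElem_map, List.getElem_range, g1, g2]
    rw [List.getElem_drop, List.getElem_drop]

-- candA = candB for every rule.
theorem candA_eq_candB (rule : List Int) (symbol : Int) :
    candA rule symbol = candB rule symbol := by
  unfold candA candB
  have h1 : PySem.List.slice rule (some 1) none = rule.drop 1 := by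
    rw [show (1:Int) = ((1:Nat):Int) from rfl, PySem.List.slice_from_natCast]
  have h2 : PySem.List.slice rule (some 2) none = rule.drop 2 := by
    rw [show (2:Int) = ((2:Nat):Int) from rfl, PySem.List.slice_from_natCast]
  rw [h1, h2, zip_eq_range_pairs, PySem.List.pyRange_one]
  have hm : (((rule.length : Int) - 1) - 1).toNat = rule.length - 2 := by omega
  rw [hm, List.filter_map, List.filter_map, List.map_map, List.map_map]
  have e1 : ∀ (k : Nat), (1:Int) + (k : Int) = ((1 + k : Nat) : Int) := by
    intro k; push_cast; ring
  have e3 : ∀ (k : Nat), ((1 + k : Nat) : Int) + 1 = ((2 + k : Nat) : Int) := by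
    intro k; push_cast; ring
  simp only [Function.comp_def, e1, e3]

-- the outer loop of A is the Set.add fold over the flattened candidate lists.
theorem outer_eq (rules : List (List Int)) (symbol : Int) (acc : List Int) :
    rules.foldl (fun result rule =>
      (PySem.List.pyRange 1 rule.length 1).foldl (fun result i =>
        if (PySem.List.pyGetD rule i 0 == symbol) && decide (i + 1 < (rule.length : Int)) then
          let nxt : Int := PySem.List.pyGetD rule (i + 1) 0
          let found : Bool := result.foldl (fun found r => if r == nxt then true else found) false
          if !found then result ++ [nxt] else result
        else result) result) acc
    = (rules.flatMap (fun rule => candA rule symbol)).foldl PySem.Set.add acc := by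
  induction rules generalizing acc with
  | nil => rfl
  | cons r rs ih =>
    simp only [List.foldl_cons, List.flatMap_cons, List.foldl_append]
    rw [inner_eq, ih]

-- defining equations of uniqB, restated for rewriting
theorem uniqB_nil : uniqB [] = [] := by rw [uniqB]

theorem uniqB_cons (x : Int) (xs : List Int) :
    uniqB (x :: xs) = x :: uniqB (xs.filter (fun y => y != x)) := by rw [uniqB]

-- the Set.add fold is uniqB of the not-yet-seen elements.
theorem foldl_add_eq_uniqB (xs acc : List Int) :
    xs.foldl PySem.Set.add acc = acc ++ uniqB (xs.filter (fun y => !acc.contains y)) := by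
  induction xs generalizing acc with
  | nil =>
    rw [List.foldl_nil, List.filter_nil, uniqB_nil, List.append_nil]
  | cons x xs ih =>
    simp only [List.foldl_cons, List.filter_cons]
    by_cases h : acc.contains x
    · have hmem : x ∈ acc := by simpa using h
      have hadd : PySem.Set.add acc x = acc := by simp [PySem.Set.add, hmem]
      simp only [h, Bool.not_true, if_neg (by simp : ¬ (false = true))]
      rw [hadd, ih]
    · have hmem : x ∉ acc := by simpa using h
      have hadd : PySem.Set.add acc x = acc ++ [x] := by simp [PySem.Set.add, hmem]
      simp only [h, Bool.not_false]
      rw [if_pos trivial, hadd, ih, uniqB_cons]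
      rw [List.append_assoc, List.singleton_append]
      congr 2
      rw [List.filter_filter]
      congr 1
      apply List.filter_congr
      intro y _
      cases hc : acc.contains y <;> cases hx : y == x <;>
        simp_all

-- ===== VERDICT (by name: the statement is the Claim_ definition above) =====
theorem follow_set_spec : Claim_equal_follow_set := by
  intro rules symbol hD
  clear hD
  unfold Spec_follow_set follow_set follow_set_alt
  rw [outer_eq, foldl_add_eq_uniqB]
  simp only [List.nil_append, List.contains_nil, Bool.not_false, List.filter_true]
  congr 1
  induction rules with
  | nil => rfl
  | cons r rs ih =>
    simp only [List.flatMap_cons]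
    rw [ih]
    congr 1
    exact candA_eq_candB r symbol
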